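-- pv_equiv track=rewrite | github.com/alex-mextner/code-ext-book | book_helpers.py | _indent_spaces
-- ===== SOURCE A (Python) =====
-- def _indent_spaces(line: str) -> str:
--     """Convert leading spaces/tabs to &nbsp; so ReportLab preserves indentation."""
--     result = []
--     for ch in line:
--         if ch == ' ':
--             result.append('&nbsp;')
--         elif ch == '\t':
--             result.append('&nbsp;&nbsp;&nbsp;&nbsp;')
--         else:
--             break
--     return ''.join(result) + line.lstrip(' \t')
-- ===== SOURCE B (Python) =====
-- def _indent_spaces(line: str) -> str:
--     """Convert leading spaces/tabs to &nbsp; so ReportLab preserves indentation."""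
--     stripped = line.lstrip(' \t')
--     prefix = line[:len(line) - len(stripped)]
--     return prefix.replace(' ', '&nbsp;').replace('\t', '&nbsp;&nbsp;&nbsp;&nbsp;') + stripped
-- ===== Notes on version B (the rewrite author's own statement) =====
-- stated objective: simpler
-- what changed: Replaces the character-by-character append/break loop with lstrip-based prefix extraction followed by two whole-string replace passes over just the prefix.
import Mathlib
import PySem

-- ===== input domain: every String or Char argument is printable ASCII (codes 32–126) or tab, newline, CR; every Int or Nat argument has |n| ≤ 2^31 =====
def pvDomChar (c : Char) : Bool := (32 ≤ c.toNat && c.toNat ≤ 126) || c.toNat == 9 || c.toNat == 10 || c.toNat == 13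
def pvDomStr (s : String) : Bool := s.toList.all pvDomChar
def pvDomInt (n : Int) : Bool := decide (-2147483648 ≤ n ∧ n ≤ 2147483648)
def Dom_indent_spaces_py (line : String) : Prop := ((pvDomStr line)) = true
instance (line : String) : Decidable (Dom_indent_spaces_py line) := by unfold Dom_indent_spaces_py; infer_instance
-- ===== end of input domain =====

-- B replaces A's per-character append/break loop by lstrip-based prefix extraction plus two
-- whole-string replace passes over the prefix (objective: simpler).

-- ===== PORT A =====
-- the for-loop with break: consume leading ' '/'\t', emitting their entities, stop at the first other char
def pvALoop : List Char → List String
  | [] => []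
  | c :: t =>
      if c = ' ' then "&nbsp;" :: pvALoop t
      else if c = '\t' then "&nbsp;&nbsp;&nbsp;&nbsp;" :: pvALoop t
      else []

def indent_spaces_py (line : String) : String :=
  -- ''.join(result) + line.lstrip(' \t'); lstrip(' \t') ported as dropWhile over the chars (exact)
  String.join (pvALoop line.toList)
    ++ String.ofList (line.toList.dropWhile (fun c => c == ' ' || c == '\t'))

-- ===== PORT B =====
def indent_spaces_py_alt (line : String) : String :=
  let stripped := String.ofList (line.toList.dropWhile (fun c => c == ' ' || c == '\t'))  -- line.lstrip(' \t'), exact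
  let pref := PySem.Str.slice line none (some ((PySem.Str.len line : Int) - (PySem.Str.len stripped : Int)))
  PySem.Str.replace (PySem.Str.replace pref " " "&nbsp;") "\t" "&nbsp;&nbsp;&nbsp;&nbsp;" ++ stripped

-- ===== PRECONDITION & SPEC =====
def Spec_indent_spaces_py (line : String) (out : String) : Prop := out = indent_spaces_py_alt line
instance (line : String) (out : String) : Decidable (Spec_indent_spaces_py line out) := by unfold Spec_indent_spaces_py; infer_instance

-- ===== CLAIM (what is proved, stated in full; the proofs are below) =====
def Claim_equal_indent_spaces_py : Prop := ∀ (line : String), Dom_indent_spaces_py line → Spec_indent_spaces_py line (indent_spaces_py line)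

-- ===== LEMMAS AND PROOFS =====

-- single-character replace is a flatMap
theorem replace_go_single (a : Char) (new : List Char) :
    ∀ (fuel : Nat) (l acc : List Char), l.length ≤ fuel →
      PySem.Chars.replace.go [a] new fuel l acc
        = acc.reverse ++ l.flatMap (fun c => if c = a then new else [c]) := by
  intro fuel
  induction fuel with
  | zero =>
      intro l acc h
      have : l = [] := List.length_eq_zero_iff.mp (Nat.le_zero.mp h)
      subst this; simp [PySem.Chars.replace.go]
  | succ n ih =>
      intro l acc h
      cases l with
      | nil => simp [PySem.Chars.replace.go]
      | cons c t =>
          by_cases hc : c = a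
          · subst hc
            have hp : List.isPrefixOf [c] (c :: t) = true := by
              simp [List.isPrefixOf]
            simp only [PySem.Chars.replace.go, hp, if_pos]
            rw [ih (List.drop [c].length (c :: t)) (new.reverse ++ acc)
                (by simpa using Nat.le_of_succ_le_succ h)]
            simp
          · have hp : List.isPrefixOf [a] (c :: t) = false := by
              simp [List.isPrefixOf]
              intro h'; exact absurd h'.symm hc
            simp only [PySem.Chars.replace.go, hp]
            rw [ih t (c :: acc) (by simpa using Nat.le_of_succ_le_succ h)]
            simp [hc]

theorem replace_single (a : Char) (new l : List Char) :
    PySem.Chars.replace l [a] new = l.flatMap (fun c => if c = a then new else [c]) := by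
  simp only [PySem.Chars.replace, List.isEmpty_cons, Bool.false_eq_true, if_false]
  simpa using replace_go_single a new l.length l [] le_rfl

theorem join_toList_aux (l : List String) (acc : String) :
    (l.foldl (· ++ ·) acc).toList = acc.toList ++ (l.map String.toList).flatten := by
  induction l generalizing acc with
  | nil => simp
  | cons s t ih => simp [ih, String.toList_append]

theorem join_toList (l : List String) :
    (String.join l).toList = (l.map String.toList).flatten := by
  simp [String.join, join_toList_aux]

theorem prefix_flat (p : List Char)
    (hmem : ∀ c ∈ p, (c == ' ' || c == '\t') = true) :
    ((pvALoop p).map String.toList).flatten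
      = (p.flatMap (fun c => if c = ' ' then "&nbsp;".toList else [c])).flatMap
          (fun c => if c = '\t' then "&nbsp;&nbsp;&nbsp;&nbsp;".toList else [c]) := by
  induction p with
  | nil => simp [pvALoop]
  | cons c t ih =>
      have hc : (c == ' ' || c == '\t') = true := hmem c (List.mem_cons_self)
      have ht := ih (fun d hd => hmem d (List.mem_cons_of_mem _ hd))
      rcases Bool.or_eq_true_iff.mp hc with h | h
      · have hce : c = ' ' := by simpa using h
        subst hce
        simp [pvALoop, ht]
      · have hce : c = '\t' := by simpa using h
        subst hce
        simp [pvALoop, ht]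

theorem pvALoop_takeWhile (cs : List Char) :
    pvALoop cs = pvALoop (cs.takeWhile (fun c => c == ' ' || c == '\t')) := by
  induction cs with
  | nil => rfl
  | cons c t ih =>
      by_cases h1 : c = ' '
      · subst h1; simpa [pvALoop] using ih
      · by_cases h2 : c = '\t'
        · subst h2; simpa [pvALoop, List.takeWhile] using ih
        · have hb : (c == ' ' || c == '\t') = false := by simp [h1, h2]
          simp [pvALoop, h1, h2, List.takeWhile, hb]

theorem indent_spaces_py_eq (line : String) :
    indent_spaces_py line = indent_spaces_py_alt line := by
  apply String.ext
  show (indent_spaces_py line).toList = (indent_spaces_py_alt line).toList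
  simp only [indent_spaces_py, indent_spaces_py_alt, String.toList_append, join_toList,
    PySem.Str.toList_replace, PySem.Str.toList_slice, PySem.Str.len_eq,
    PySem.Chars.slice_eq_listSlice, String.toList_ofList]
  generalize line.toList = cs
  have htd := List.takeWhile_append_dropWhile (p := fun c => c == ' ' || c == '\t') (l := cs)
  have hlen : (cs.takeWhile (fun c => c == ' ' || c == '\t')).length
      = cs.length - (cs.dropWhile (fun c => c == ' ' || c == '\t')).length := by
    have := congrArg List.length htd
    simp only [List.length_append] at this
    omega
  have hd : (cs.dropWhile (fun c => c == ' ' || c == '\t')).length ≤ cs.length := by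
    have := congrArg List.length htd
    simp only [List.length_append] at this
    omega
  have hslice : PySem.List.slice cs none
      (some ((cs.length : Int) - ((cs.dropWhile (fun c => c == ' ' || c == '\t')).length : Int)))
      = cs.takeWhile (fun c => c == ' ' || c == '\t') := by
    have hcast : ((cs.length : Int) - ((cs.dropWhile (fun c => c == ' ' || c == '\t')).length : Int))
        = ((cs.length - (cs.dropWhile (fun c => c == ' ' || c == '\t')).length : Nat) : Int) := by
      omega
    rw [hcast, PySem.List.slice_to, ← hlen]
    · exact ((List.prefix_iff_eq_take).mp (List.takeWhile_prefix _)).symm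
    · exact Int.natCast_nonneg _
  rw [hslice, show (" ".toList) = [' '] from rfl, show ("\t".toList) = ['\t'] from rfl,
      replace_single, replace_single, pvALoop_takeWhile]
  rw [prefix_flat _ (by intro c hc; exact List.mem_takeWhile_imp (p := fun c => c == ' ' || c == '\t') (l := cs) hc)]

-- ===== VERDICT (by name: the statement is the Claim_ definition above) =====
theorem indent_spaces_py_spec : Claim_equal_indent_spaces_py := by
  intro line _
  show _ = _
  exact indent_spaces_py_eq line
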